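-- pv_equiv track=rewrite | github.com/jahunt1274/data_analysis | src/utils/data_processing_utils.py | categorize_session_lengths
-- ===== SOURCE A (Python) =====
-- from typing import List, Dict, Any, Optional, Set
--
-- def categorize_session_lengths(sessions: List[Dict[str, Any]]) -> Dict[str, int]:
--     """
--     Categorize sessions by duration.
--
--     Args:
--         sessions: List of session data with duration_minutes field
--
--     Returns:
--         Dict mapping duration categories to counts
--     """
--     categories = {
--         "under_5min": 0,
--         "5_15min": 0,
--         "15_30min": 0,
--         "30_60min": 0,
--         "1_3hr": 0,
--         "over_3hr": 0,
--     }
--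
--     for session in sessions:
--         duration = session["duration_minutes"]
--
--         if duration < 5:
--             categories["under_5min"] += 1
--         elif duration < 15:
--             categories["5_15min"] += 1
--         elif duration < 30:
--             categories["15_30min"] += 1
--         elif duration < 60:
--             categories["30_60min"] += 1
--         elif duration < 180:  # 3 hours
--             categories["1_3hr"] += 1
--         else:
--             categories["over_3hr"] += 1
--
--     return categories
-- ===== SOURCE B (Python) =====
-- _THRESHOLDS = [5, 15, 30, 60, 180]
-- _LABELS = ["under_5min", "5_15min", "15_30min", "30_60min", "1_3hr", "over_3hr"]
--
--
-- def _bisect_right(xs, x, lo, hi):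
--     """Rightmost insertion point of x in sorted xs[lo:hi] (binary search)."""
--     if lo >= hi:
--         return lo
--     mid = (lo + hi) // 2
--     if x < xs[mid]:
--         return _bisect_right(xs, x, lo, mid)
--     return _bisect_right(xs, x, mid + 1, hi)
--
--
-- def categorize_session_lengths(sessions):
--     """Categorize sessions by duration via binary search over a boundary table."""
--     categories = dict.fromkeys(_LABELS, 0)
--     for session in sessions:
--         idx = _bisect_right(_THRESHOLDS, session["duration_minutes"], 0, len(_THRESHOLDS))
--         categories[_LABELS[idx]] += 1
--     return categories
-- ===== Notes on version B (the rewrite author's own statement) =====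
-- stated objective: alternative
-- what changed: Replaces the six-way if/elif comparison cascade with a binary search over a precomputed boundary table [5,15,30,60,180] whose result indexes a parallel label list; the result dict is pre-initialized from the labels.
import Mathlib
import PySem

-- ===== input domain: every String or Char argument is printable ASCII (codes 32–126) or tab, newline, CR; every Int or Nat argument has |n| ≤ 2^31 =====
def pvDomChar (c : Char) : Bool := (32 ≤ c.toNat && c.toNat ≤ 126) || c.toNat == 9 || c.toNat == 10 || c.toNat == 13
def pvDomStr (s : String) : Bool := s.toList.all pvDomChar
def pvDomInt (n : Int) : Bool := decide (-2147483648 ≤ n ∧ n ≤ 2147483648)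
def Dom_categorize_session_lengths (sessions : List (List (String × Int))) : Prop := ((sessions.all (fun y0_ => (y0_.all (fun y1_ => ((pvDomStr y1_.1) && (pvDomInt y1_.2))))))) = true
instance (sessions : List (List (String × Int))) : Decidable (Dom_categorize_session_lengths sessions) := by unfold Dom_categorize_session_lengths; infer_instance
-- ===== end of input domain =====

-- B replaces A's six-way if/elif cascade with a binary search over a boundary table indexing a parallel label list (alternative, same asymptotic cost).


-- ===== PORT A =====
-- A: initialize the six-category dict, then for each session run the if/elif
-- comparison cascade on session["duration_minutes"] and bump the matching key.
def categorize_session_lengths (sessions : List (List (String × Int))) : List (String × Int) :=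
  let init : PySem.Dict String Int :=
    PySem.Dict.ofList [("under_5min", 0), ("5_15min", 0), ("15_30min", 0),
                       ("30_60min", 0), ("1_3hr", 0), ("over_3hr", 0)]
  (sessions.foldl (fun categories session =>
      -- session["duration_minutes"]; Pre_ guarantees the key is present
      let duration := (PySem.Dict.mk session).getD "duration_minutes" 0
      if duration < 5 then categories.modify "under_5min" 0 (· + 1)
      else if duration < 15 then categories.modify "5_15min" 0 (· + 1)
      else if duration < 30 then categories.modify "15_30min" 0 (· + 1)
      else if duration < 60 then categories.modify "30_60min" 0 (· + 1)
      else if duration < 180 then categories.modify "1_3hr" 0 (· + 1)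
      else categories.modify "over_3hr" 0 (· + 1)) init).items

-- ===== PORT B =====
-- hand-written binary search from Source B, ported step for step (xs[mid] is always in range here)
def pvBisectRight (xs : List Int) (x : Int) (lo hi : Nat) : Nat :=
  if lo ≥ hi then lo
  else
    let mid := (lo + hi) / 2
    if x < xs.getD mid 0 then pvBisectRight xs x lo mid
    else pvBisectRight xs x (mid + 1) hi
termination_by hi - lo
decreasing_by all_goals omega

def categorize_session_lengths_alt (sessions : List (List (String × Int))) : List (String × Int) :=
  let thresholds : List Int := [5, 15, 30, 60, 180]
  let labels : List String := ["under_5min", "5_15min", "15_30min", "30_60min", "1_3hr", "over_3hr"]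
  let init : PySem.Dict String Int := PySem.Dict.ofList (labels.map (fun l => (l, 0)))
  (sessions.foldl (fun categories session =>
      let idx := pvBisectRight thresholds ((PySem.Dict.mk session).getD "duration_minutes" 0) 0 thresholds.length
      -- labels[idx]: idx ≤ 5 always, so the access is in range
      categories.modify (labels.getD idx "") 0 (· + 1)) init).items

-- ===== PRECONDITION & SPEC =====
-- Pre_ excludes exactly the sessions missing the "duration_minutes" key, on which A raises KeyError.
def Pre_categorize_session_lengths (sessions : List (List (String × Int))) : Prop :=
  ∀ s ∈ sessions, (PySem.Dict.mk s).contains "duration_minutes" = true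
instance (sessions : List (List (String × Int))) : Decidable (Pre_categorize_session_lengths sessions) := by unfold Pre_categorize_session_lengths; infer_instance
def pvWitness_categorize_session_lengths : (List (List (String × Int))) := [[("duration_minutes", 17)], [("duration_minutes", 240)]]

def Spec_categorize_session_lengths (sessions : List (List (String × Int))) (out : List (String × Int)) : Prop := out = categorize_session_lengths_alt sessions
instance (sessions : List (List (String × Int))) (out : List (String × Int)) : Decidable (Spec_categorize_session_lengths sessions out) := by unfold Spec_categorize_session_lengths; infer_instance

-- ===== CLAIM (what is proved, stated in full; the proofs are below) =====
def Claim_equal_categorize_session_lengths : Prop := ∀ (sessions : List (List (String × Int))), Dom_categorize_session_lengths sessions → Pre_categorize_session_lengths sessions → Spec_categorize_session_lengths sessions (categorize_session_lengths sessions)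

-- ===== LEMMAS AND PROOFS =====

-- the binary search on the concrete boundary table equals the comparison cascade's index
lemma pvBisectRight_table (d : Int) :
    pvBisectRight [5, 15, 30, 60, 180] d 0 5 =
      if d < 5 then 0 else if d < 15 then 1 else if d < 30 then 2
      else if d < 60 then 3 else if d < 180 then 4 else 5 := by
  simp [pvBisectRight.eq_def]
  split_ifs <;> omega

-- the two per-session step functions agree
lemma step_eq (categories : PySem.Dict String Int) (session : List (String × Int)) :
    (let duration := (PySem.Dict.mk session).getD "duration_minutes" 0
     if duration < 5 then categories.modify "under_5min" 0 (· + 1)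
     else if duration < 15 then categories.modify "5_15min" 0 (· + 1)
     else if duration < 30 then categories.modify "15_30min" 0 (· + 1)
     else if duration < 60 then categories.modify "30_60min" 0 (· + 1)
     else if duration < 180 then categories.modify "1_3hr" 0 (· + 1)
     else categories.modify "over_3hr" 0 (· + 1)) =
    (let idx := pvBisectRight [5, 15, 30, 60, 180] ((PySem.Dict.mk session).getD "duration_minutes" 0) 0 5
     categories.modify ((["under_5min", "5_15min", "15_30min", "30_60min", "1_3hr", "over_3hr"] : List String).getD idx "") 0 (· + 1)) := by
  simp only [pvBisectRight_table]
  split_ifs <;> rfl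

-- ===== VERDICT (by name: the statement is the Claim_ definition above) =====
theorem categorize_session_lengths_spec : Claim_equal_categorize_session_lengths := by
  intro sessions _ _
  unfold Spec_categorize_session_lengths categorize_session_lengths categorize_session_lengths_alt
  simp only []
  congr 1
  simp only [List.length_cons, List.length_nil, List.map]
  congr 1
  funext cats s
  simpa using step_eq cats s
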